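-- pv_equiv track=rewrite | github.com/dimitreortt/Iniciacao-Cientifica---Biologia-Computacional | Cinco algoritmos para Intervalos Comuns Máximo/Gurobi/calculaL.py | calculaL
-- ===== SOURCE A (Python) =====
-- def occ(gene, genome, lista):
-- 	count = 0
-- 	for g in genome:
-- 		if g == gene:
-- 			count = count + 1
-- 	return count
--
-- def calculaL(GA, GB):
-- 	L = 0
-- 	lista = []
-- 	for g in GA:
-- 		if g not in lista:
-- 			lista.append(g)
-- 			occ1 = occ(g, GA, lista)
-- 			occ2 = occ(g, GB, lista)
-- 			L = L + min(occ1, occ2)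
--
-- 	return L
-- ===== SOURCE B (Python) =====
-- def _count(xs):
--     c = {}
--     for g in xs:
--         c[g] = c.get(g, 0) + 1
--     return c
--
-- def calculaL(GA, GB):
--     cb = _count(GB)
--     total = 0
--     for g, c in _count(GA).items():
--         total += min(c, cb.get(g, 0))
--     return total
-- ===== Notes on version B (the rewrite author's own statement) =====
-- stated objective: faster
-- what changed: Replaces A's distinct-gene loop with nested full-list occurrence scans (quadratic membership test plus two O(n) scans per distinct gene) by building two count dictionaries in one pass each and summing min counts over the first dictionary's entries.
import Mathlib
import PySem

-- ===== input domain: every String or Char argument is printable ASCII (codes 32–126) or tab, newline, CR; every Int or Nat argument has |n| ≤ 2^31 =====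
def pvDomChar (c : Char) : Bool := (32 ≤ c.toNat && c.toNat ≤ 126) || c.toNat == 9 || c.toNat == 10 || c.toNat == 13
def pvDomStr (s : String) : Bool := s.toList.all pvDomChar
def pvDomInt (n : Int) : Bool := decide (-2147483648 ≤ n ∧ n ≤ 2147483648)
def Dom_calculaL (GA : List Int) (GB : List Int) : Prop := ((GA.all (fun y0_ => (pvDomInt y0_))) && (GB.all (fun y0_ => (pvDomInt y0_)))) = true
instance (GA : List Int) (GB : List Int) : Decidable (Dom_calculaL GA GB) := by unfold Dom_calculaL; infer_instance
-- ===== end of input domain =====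

-- B builds count dictionaries in one pass each and sums min counts over the first
-- dictionary's entries, replacing A's distinct-gene loop with nested occurrence scans (faster).

-- ===== PORT A =====
def occ (gene : Int) (genome : List Int) (lista : List Int) : Int :=
  genome.foldl (fun count g => if g == gene then count + 1 else count) 0

def calculaL (GA : List Int) (GB : List Int) : Int :=
  (GA.foldl (fun (st : Int × List Int) g =>
      if g ∈ st.2 then st
      else
        let lista := st.2 ++ [g]
        (st.1 + min (occ g GA lista) (occ g GB lista), lista))
    ((0 : Int), ([] : List Int))).1

-- ===== PORT B =====
def pyCount (xs : List Int) : PySem.Dict Int Int :=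
  xs.foldl (fun c g => c.insert g (c.getD g 0 + 1)) PySem.Dict.empty

def calculaL_alt (GA : List Int) (GB : List Int) : Int :=
  (pyCount GA).items.foldl (fun total p => total + min p.2 ((pyCount GB).getD p.1 0)) 0

-- ===== PRECONDITION & SPEC =====
def Spec_calculaL (GA : List Int) (GB : List Int) (out : Int) : Prop := out = calculaL_alt GA GB
instance (GA : List Int) (GB : List Int) (out : Int) : Decidable (Spec_calculaL GA GB out) := by unfold Spec_calculaL; infer_instance

-- ===== CLAIM (what is proved, stated in full; the proofs are below) =====
def Claim_equal_calculaL : Prop := ∀ (GA : List Int) (GB : List Int), Dom_calculaL GA GB → Spec_calculaL GA GB (calculaL GA GB)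

-- ===== LEMMAS AND PROOFS =====

-- accumulator form of occ's counting loop
theorem count_fold (gene : Int) (genome : List Int) (c : Int) :
    genome.foldl (fun count g => if g == gene then count + 1 else count) c
      = c + (genome.count gene : Int) := by
  induction genome generalizing c with
  | nil => simp
  | cons x l ih =>
    simp only [List.foldl_cons, List.count_cons, ih]
    by_cases h : x = gene <;> simp [h]; ring

-- occ ignores 'lista' and counts occurrences
theorem occ_eq_count (gene : Int) (genome lista : List Int) :
    occ gene genome lista = (genome.count gene : Int) := by
  unfold occ; simpa using count_fold gene genome 0

-- the fresh (not-yet-seen) elements of l relative to lista, in first-occurrence order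
def fresh (l lista : List Int) : List Int :=
  match l with
  | [] => []
  | x :: l' => if x ∈ lista then fresh l' lista else x :: fresh l' (lista ++ [x])

theorem update_eq_append_fresh (l lista : List Int) :
    PySem.Set.update lista l = lista ++ fresh l lista := by
  induction l generalizing lista with
  | nil => simp [fresh, PySem.Set.update_nil]
  | cons x l ih =>
    by_cases h : x ∈ lista
    · simp [fresh, h, PySem.Set.update_cons, ih]
    · simp [fresh, h, PySem.Set.update_cons, ih]

theorem fresh_nil_eq (l : List Int) : fresh l [] = PySem.Set.ofList l := by
  have h := update_eq_append_fresh l []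
  simp only [List.nil_append] at h
  rw [← h, PySem.Set.update_nil_left]

theorem calculaL_loop (GA GB : List Int) (l lista : List Int) (L : Int) :
    (l.foldl (fun (st : Int × List Int) g =>
        if g ∈ st.2 then st
        else
          let lista := st.2 ++ [g]
          (st.1 + min (occ g GA lista) (occ g GB lista), lista)) (L, lista)).1
      = L + ((fresh l lista).map
          (fun g => min ((GA.count g : Int)) ((GB.count g : Int)))).sum := by
  induction l generalizing lista L with
  | nil => simp [fresh]
  | cons x l ih =>
    by_cases h : x ∈ lista
    · simp only [List.foldl_cons, if_pos h]
      rw [ih]; simp [fresh, h]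
    · simp only [List.foldl_cons, if_neg h]
      rw [ih]
      simp only [fresh, if_neg h, List.map_cons, List.sum_cons, occ_eq_count]
      ring

-- ===== VERDICT (by name: the statement is the Claim_ definition above) =====
theorem calculaL_spec : Claim_equal_calculaL := by
  intro GA GB _
  unfold Spec_calculaL calculaL calculaL_alt
  rw [calculaL_loop GA GB GA [] 0, fresh_nil_eq]
  unfold pyCount
  simp only [PySem.Dict.foldl_insert_getD_add_one_eq_counter,
      PySem.Dict.items_counter, List.foldl_map]
  simp [PySem.List.foldl_add, PySem.Dict.getD_counter]
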